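-- pv_equiv track=rewrite | github.com/diffty/AdventOfCode2023 | day14/day14.py | make_boulders_roll
-- ===== SOURCE A (Python) =====
-- def make_boulders_roll(data_lines):
--     data_lines_rot = list(map(lambda l: "".join(l), zip(*data_lines)))
--
--     weight = 0
--
--     for i, l in enumerate(data_lines_rot):
--         splitted_line = l.split('#')
--         pos = len(l)
--
--         for j, section in enumerate(splitted_line):
--             nb_boulders = section.count("O")
--             splitted_line[j] = ("O" * nb_boulders).ljust(len(section), '.')
--             weight += sum(range(pos-nb_boulders+1,pos+1))
--             pos -= len(section)+1
--
--         data_lines_rot[i]  = "#".join(splitted_line)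
--
--     data_lines = list(map(lambda l: "".join(l), zip(*data_lines_rot)))
--
--     return data_lines, weight
-- ===== SOURCE B (Python) =====
-- def make_boulders_roll(data_lines):
--     rot = ["".join(t) for t in zip(*data_lines)]
--
--     weight = 0
--     out_rows = []
--     for row in rot:
--         n = len(row)
--         res = ['.'] * n
--         free = 0                      # next index a rolling boulder settles at
--         for k, c in enumerate(row):
--             if c == '#':
--                 res[k] = '#'
--                 free = k + 1
--             elif c == 'O':
--                 res[free] = 'O'
--                 weight += n - free
--                 free += 1
--         out_rows.append("".join(res))
--
--     data_lines = ["".join(t) for t in zip(*out_rows)]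
--
--     return data_lines, weight
-- ===== Notes on version B (the rewrite author's own statement) =====
-- stated objective: alternative
-- what changed: Replaces the per-rotated-row split('#')/count/ljust/join and sum(range(...)) bookkeeping by a single left-to-right scan with a write pointer: each 'O' is written at the next free slot and its load n-free added directly; '#' pins the pointer behind itself.
import Mathlib
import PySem

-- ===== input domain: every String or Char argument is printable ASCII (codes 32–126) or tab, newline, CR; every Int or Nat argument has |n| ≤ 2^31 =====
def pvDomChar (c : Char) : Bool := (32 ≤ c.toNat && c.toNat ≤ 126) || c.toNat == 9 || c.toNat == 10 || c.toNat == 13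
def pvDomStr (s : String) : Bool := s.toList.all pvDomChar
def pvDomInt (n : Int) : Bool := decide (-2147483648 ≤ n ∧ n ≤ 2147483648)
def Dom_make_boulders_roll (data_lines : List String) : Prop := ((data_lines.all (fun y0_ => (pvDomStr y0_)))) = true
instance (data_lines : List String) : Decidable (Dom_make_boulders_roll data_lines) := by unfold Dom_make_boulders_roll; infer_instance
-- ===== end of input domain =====

-- B replaces A's per-row split('#')/count/ljust/join + sum(range(..)) bookkeeping by one
-- left-to-right scan per rotated row with a write pointer (objective: alternative, same cost).

-- ===== PORT A =====
-- shared A/B helper: Python's list(map(lambda l: "".join(l), zip(*rows))) — truncating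
-- transpose to the minimum row length (both Pythons perform exactly this step).
def pyZipJoin (ls : List (List Char)) : List (List Char) :=
  match ls with
  | [] => []
  | l0 :: _ =>
    let n := ls.foldl (fun m l => min m l.length) l0.length
    (List.range n).map (fun i => ls.map (fun l => l.getD i ' '))

-- ("O" * nb).ljust(width, '.') — exact: pads on the right only when shorter
def pyLjust (s : List Char) (width : Nat) (fill : Char) : List Char :=
  if width ≤ s.length then s else s ++ List.replicate (width - s.length) fill

-- the inner 'for j, section in enumerate(splitted_line)' loop of A (pos, weight threaded)
def aLoop : List (List Char) → Int → Int → (List (List Char) × Int)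
  | [], _, w => ([], w)
  | sec :: rest, pos, w =>
    let nb := PySem.Chars.count sec ['O']
    let newSec := pyLjust (List.replicate nb 'O') sec.length '.'
    let w' := w + (PySem.List.pyRange (pos - (nb : Int) + 1) (pos + 1) 1).sum
    let (rs, wf) := aLoop rest (pos - ((sec.length : Int) + 1)) w'
    (newSec :: rs, wf)

-- one iteration of A's outer loop on a rotated line l
def aRow (l : List Char) (w : Int) : List Char × Int :=
  let parts := PySem.Chars.splitOn l ['#']
  let (ps, w') := aLoop parts (l.length : Int) w
  (PySem.Chars.join ['#'] ps, w')

def make_boulders_roll (data_lines : List String) : List String × Int :=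
  let rot := pyZipJoin (data_lines.map String.toList)
  let (rows, w) := rot.foldl
    (fun (acc : List (List Char) × Int) l =>
      let (r, w') := aRow l acc.2
      (acc.1 ++ [r], w')) ([], 0)
  ((pyZipJoin rows).map (fun r => String.ofList r), w)

-- ===== PORT B =====
-- B's inner scan: k = enumerate index, free = write pointer, res = output row, w = weight
def bScan (n : Nat) : List Char → Nat → Nat → List Char → Int → (List Char × Int)
  | [], _, _, res, w => (res, w)
  | c :: cs, k, free, res, w =>
    if c = '#' then bScan n cs (k+1) (k+1) (res.set k '#') w
    else if c = 'O' then
      bScan n cs (k+1) (free+1) (res.set free 'O') (w + ((n : Int) - (free : Int)))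
    else bScan n cs (k+1) free res w

-- one iteration of B's outer loop on a rotated line l (res starts as ['.'] * n)
def bRow (l : List Char) (w : Int) : List Char × Int :=
  bScan l.length l 0 0 (List.replicate l.length '.') w

def make_boulders_roll_alt (data_lines : List String) : List String × Int :=
  let rot := pyZipJoin (data_lines.map String.toList)
  let (rows, w) := rot.foldl
    (fun (acc : List (List Char) × Int) l =>
      let (r, w') := bRow l acc.2
      (acc.1 ++ [r], w')) ([], 0)
  ((pyZipJoin rows).map (fun r => String.ofList r), w)

-- ===== PRECONDITION & SPEC =====
def Spec_make_boulders_roll (data_lines : List String) (out : List String × Int) : Prop := out = make_boulders_roll_alt data_lines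
instance (data_lines : List String) (out : List String × Int) : Decidable (Spec_make_boulders_roll data_lines out) := by unfold Spec_make_boulders_roll; infer_instance

-- ===== CLAIM (what is proved, stated in full; the proofs are below) =====
def Claim_equal_make_boulders_roll : Prop := ∀ (data_lines : List String), Dom_make_boulders_roll data_lines → Spec_make_boulders_roll data_lines (make_boulders_roll data_lines)

-- ===== LEMMAS AND PROOFS =====

-- descending load sum: wsum m c = m + (m-1) + ... + (m-c+1)
def wsum (m : Int) : Nat → Int
  | 0 => 0
  | c+1 => m + wsum (m-1) c

lemma set_append_len {α : Type} (D res : List α) (i : Nat) (a : α) :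
    (D ++ res).set (D.length + i) a = D ++ res.set i a := by
  rw [List.set_append]; simp

lemma sum_pyRange_desc : ∀ (c : Nat) (m : Int),
    (PySem.List.pyRange (m - (c : Int) + 1) (m + 1) 1).sum = wsum m c := by
  intro c
  induction c with
  | zero => intro m; simp [PySem.List.pyRange, wsum]
  | succ c ih =>
    intro m
    have hsplit : PySem.List.pyRange (m - (c : Int)) (m + 1) 1
        = PySem.List.pyRange (m - (c : Int)) m 1 ++ PySem.List.pyRange m (m + 1) 1 :=
      PySem.List.pyRange_one_append _ _ _ (by omega) (by omega)
    have hone : PySem.List.pyRange m (m + 1) 1 = [m] := by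
      rw [PySem.List.pyRange_one_cons (by omega)]
      simp [PySem.List.pyRange]
    have hpre : PySem.List.pyRange (m - (c : Int)) m 1
        = PySem.List.pyRange ((m - 1) - (c : Int) + 1) ((m - 1) + 1) 1 := by
      congr 1 <;> omega
    have hc1 : m - (((c + 1 : Nat) : Int)) + 1 = m - (c : Int) := by push_cast; ring
    rw [hc1, hsplit, hone, hpre, List.sum_append, ih (m - 1)]
    simp [wsum]
    ring

-- splitOn.go facts
lemma go_hashfree (fuel : Nat) : ∀ (l cur : List Char) (acc : List (List Char)), '#' ∉ l →
    PySem.Chars.splitOn.go ['#'] fuel l cur acc = acc.reverse ++ [cur.reverse ++ l] := by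
  induction fuel with
  | zero => intro l cur acc h; simp [PySem.Chars.splitOn.go]
  | succ fuel ih =>
    intro l cur acc h
    cases l with
    | nil => simp [PySem.Chars.splitOn.go]
    | cons c rest =>
      have hc : c ≠ '#' := fun hh => h (hh ▸ List.mem_cons_self ..)
      rw [PySem.Chars.splitOn.go]
      simp only [List.isPrefixOf, Bool.and_true, beq_iff_eq]
      rw [if_neg (show ¬('#' = c) from fun h' => hc h'.symm)]
      rw [ih rest (c :: cur) acc (fun hm => h (List.mem_cons_of_mem _ hm))]
      simp

lemma go_acc (fuel : Nat) : ∀ (l cur : List Char) (acc : List (List Char)),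
    PySem.Chars.splitOn.go ['#'] fuel l cur acc
      = acc.reverse ++ PySem.Chars.splitOn.go ['#'] fuel l cur [] := by
  induction fuel with
  | zero => intro l cur acc; simp [PySem.Chars.splitOn.go]
  | succ fuel ih =>
    intro l cur acc
    cases l with
    | nil => simp [PySem.Chars.splitOn.go]
    | cons c rest =>
      rw [PySem.Chars.splitOn.go, PySem.Chars.splitOn.go]
      by_cases hc : ['#'].isPrefixOf (c :: rest) = true
      · rw [if_pos hc, if_pos hc]
        rw [ih _ _ (cur.reverse :: acc), ih _ _ [cur.reverse]]
        simp
      · rw [if_neg hc, if_neg hc, ih _ _ acc]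

lemma go_split (p : List Char) (hp : '#' ∉ p) : ∀ (fuel : Nat) (rest cur : List Char) (acc : List (List Char)),
    PySem.Chars.splitOn.go ['#'] (p.length + 1 + fuel) (p ++ '#' :: rest) cur acc
      = PySem.Chars.splitOn.go ['#'] fuel rest [] ((cur.reverse ++ p) :: acc) := by
  induction p with
  | nil =>
    intro fuel rest cur acc
    have h1 : ([] : List Char).length + 1 + fuel = fuel + 1 := by simp; omega
    rw [h1, List.nil_append, PySem.Chars.splitOn.go]
    rw [if_pos (by simp [List.isPrefixOf])]
    simp
  | cons c p ih =>
    intro fuel rest cur acc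
    have hc : c ≠ '#' := fun hh => hp (hh ▸ List.mem_cons_self ..)
    have hp' : '#' ∉ p := fun hm => hp (List.mem_cons_of_mem _ hm)
    have hlen : (c :: p).length + 1 + fuel = (p.length + 1 + fuel) + 1 := by simp; omega
    rw [hlen, List.cons_append, PySem.Chars.splitOn.go]
    rw [if_neg (by simp [List.isPrefixOf]; exact fun h' => absurd h'.symm hc)]
    rw [ih hp' fuel rest (c :: cur) acc]
    simp

lemma splitOn_hashfree (l : List Char) (h : '#' ∉ l) :
    PySem.Chars.splitOn l ['#'] = [l] := by
  rw [PySem.Chars.splitOn, go_hashfree _ _ _ _ h]; simp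

lemma splitOn_cons_hash (p rest : List Char) (hp : '#' ∉ p) :
    PySem.Chars.splitOn (p ++ '#' :: rest) ['#'] = p :: PySem.Chars.splitOn rest ['#'] := by
  rw [PySem.Chars.splitOn, PySem.Chars.splitOn]
  have h1 : (p ++ '#' :: rest).length + 1 = p.length + 1 + (rest.length + 1) := by simp; omega
  rw [h1, go_split p hp, go_acc]
  simp

lemma go_ne_nil (fuel : Nat) : ∀ (l cur : List Char) (acc : List (List Char)),
    PySem.Chars.splitOn.go ['#'] fuel l cur acc ≠ [] := by
  induction fuel with
  | zero => intro l cur acc; simp [PySem.Chars.splitOn.go]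
  | succ fuel ih =>
    intro l cur acc
    cases l with
    | nil => simp [PySem.Chars.splitOn.go]
    | cons c rest =>
      rw [PySem.Chars.splitOn.go]
      by_cases hc : ['#'].isPrefixOf (c :: rest) = true
      · rw [if_pos hc]; exact ih _ _ _
      · rw [if_neg hc]; exact ih _ _ _

lemma splitOn_ne_nil (l : List Char) : PySem.Chars.splitOn l ['#'] ≠ [] := by
  rw [PySem.Chars.splitOn]; exact go_ne_nil _ _ _ _

lemma count_go_singleton (fuel : Nat) : ∀ (l : List Char) (acc : Nat) (c : Char), l.length ≤ fuel →
    PySem.Chars.count.go [c] fuel l acc = acc + l.count c := by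
  induction fuel with
  | zero =>
    intro l acc c h
    have : l = [] := List.eq_nil_of_length_eq_zero (by omega)
    subst this; simp [PySem.Chars.count.go]
  | succ fuel ih =>
    intro l acc c h
    cases l with
    | nil => simp [PySem.Chars.count.go]
    | cons d rest =>
      rw [PySem.Chars.count.go]
      by_cases hc : c = d
      · rw [if_pos (by simp [List.isPrefixOf, hc])]
        have hd : List.drop [c].length (d :: rest) = rest := by simp
        rw [hd, ih rest (acc+1) c (by simp at h; omega)]
        simp [hc]
        omega
      · rw [if_neg (by simp [List.isPrefixOf]; exact hc)]
        rw [ih rest acc c (by simp at h; omega)]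
        simp [Ne.symm hc]

lemma count_singleton (l : List Char) (c : Char) : PySem.Chars.count l [c] = l.count c := by
  rw [PySem.Chars.count]
  simp [count_go_singleton l.length l 0 c (le_refl _)]

-- bScan facts
lemma bScan_add (cs : List Char) : ∀ (n k free : Nat) (res : List Char) (w : Int),
    bScan n cs k free res w
      = ((bScan n cs k free res 0).1, w + (bScan n cs k free res 0).2) := by
  induction cs with
  | nil => intro n k free res w; simp [bScan]
  | cons c cs ih =>
    intro n k free res w
    by_cases h1 : c = '#'
    · simp only [bScan, if_pos h1]; exact ih ..
    · by_cases h2 : c = 'O'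
      · simp only [bScan, if_neg h1, if_pos h2]
        rw [ih _ _ _ _ (w + _), ih _ _ _ _ (0 + _)]
        simp; ring
      · simp only [bScan, if_neg h1, if_neg h2]; exact ih ..

lemma bScan_shift (cs : List Char) : ∀ (off n k free : Nat) (D res : List Char) (w : Int),
    D.length = off →
    bScan (off + n) cs (off + k) (off + free) (D ++ res) w
      = (D ++ (bScan n cs k free res 0).1, w + (bScan n cs k free res 0).2) := by
  induction cs with
  | nil => intro off n k free D res w hD; simp [bScan]
  | cons c cs ih =>
    intro off n k free D res w hD
    by_cases h1 : c = '#'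
    · simp only [bScan, if_pos h1]
      rw [show off + k + 1 = off + (k + 1) from rfl,
          show (D ++ res).set (off + k) '#' = D ++ res.set k '#' from by rw [← hD]; exact set_append_len ..]
      rw [ih off n (k+1) (k+1) D _ w hD]
    · by_cases h2 : c = 'O'
      · simp only [bScan, if_neg h1, if_pos h2]
        rw [show (D ++ res).set (off + free) 'O' = D ++ res.set free 'O' from by rw [← hD]; exact set_append_len ..]
        rw [show off + k + 1 = off + (k + 1) from rfl, show off + free + 1 = off + (free + 1) from rfl]
        rw [ih off n (k+1) (free+1) D _ _ hD]
        rw [bScan_add cs n (k+1) (free+1) (res.set free 'O') (0 + _)]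
        have : ((off + n : Nat) : Int) - ((off + free : Nat) : Int) = (n : Int) - (free : Int) := by push_cast; ring
        rw [this]
        simp; ring
      · simp only [bScan, if_neg h1, if_neg h2]
        exact ih off n (k+1) free D res w hD

lemma bScan_seg (n : Nat) : ∀ (p tail : List Char) (k : Nat) (E : List Char) (d : Nat) (w : Int),
    '#' ∉ p → p.length ≤ d →
    bScan n (p ++ tail) k E.length (E ++ List.replicate d '.') w
      = bScan n tail (k + p.length) (E.length + p.count 'O')
          ((E ++ List.replicate (p.count 'O') 'O') ++ List.replicate (d - p.count 'O') '.')
          (w + wsum ((n : Int) - (E.length : Int)) (p.count 'O')) := by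
  intro p
  induction p with
  | nil => intro tail k E d w _ _; simp [wsum]
  | cons c p ih =>
    intro tail k E d w hp hd
    have hc : c ≠ '#' := fun hh => hp (hh ▸ List.mem_cons_self ..)
    have hp' : '#' ∉ p := fun hm => hp (List.mem_cons_of_mem _ hm)
    have hd1 : 1 ≤ d := le_trans (by simp) hd
    by_cases h2 : c = 'O'
    · simp only [List.cons_append, bScan, if_neg hc, if_pos h2]
      have hrepl : List.replicate d '.' = '.' :: List.replicate (d - 1) '.' := by
        cases d with
        | zero => omega
        | succ d => simp [List.replicate_succ]
      have hset : (E ++ List.replicate d '.').set E.length 'O'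
          = (E ++ ['O']) ++ List.replicate (d - 1) '.' := by
        rw [show E.length = E.length + 0 from rfl, set_append_len, hrepl]
        simp
      rw [hset]
      have hEO : E.length + 1 = (E ++ ['O']).length := by simp
      rw [hEO]
      rw [ih tail (k+1) (E ++ ['O']) (d - 1) _ hp' (by simp at hd ⊢; omega)]
      have hcount : (c :: p).count 'O' = p.count 'O' + 1 := by simp [h2]
      congr 1
      · simp [List.length_cons]; omega
      · simp [hcount]; omega
      · have hdd : d - 1 - p.count 'O' = d - (p.count 'O' + 1) := by simp at hd; omega
        rw [hcount, hdd]
        simp [List.replicate_succ]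
      · rw [hcount]
        simp only [wsum]
        have h3 : ((E ++ ['O']).length : Int) = (E.length : Int) + 1 := by simp
        rw [h3]
        have h4 : (n : Int) - ((E.length : Int) + 1) = ((n:Int) - E.length) - 1 := by ring
        rw [h4]
        ring
    · simp only [List.cons_append, bScan, if_neg hc, if_neg h2]
      rw [ih tail (k+1) E d w hp' (by simp at hd ⊢; omega)]
      have hcount : (c :: p).count 'O' = p.count 'O' := by simp [h2]
      rw [hcount]
      congr 1
      simp [List.length_cons]; omega

-- aLoop unfolding on a cons
lemma aLoop_cons (sec : List Char) (L : List (List Char)) (pos w : Int) :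
    aLoop (sec :: L) pos w
      = (pyLjust (List.replicate (PySem.Chars.count sec ['O']) 'O') sec.length '.'
            :: (aLoop L (pos - ((sec.length : Int) + 1))
                  (w + (PySem.List.pyRange (pos - ((PySem.Chars.count sec ['O'] : Nat) : Int) + 1) (pos + 1) 1).sum)).1,
         (aLoop L (pos - ((sec.length : Int) + 1))
            (w + (PySem.List.pyRange (pos - ((PySem.Chars.count sec ['O'] : Nat) : Int) + 1) (pos + 1) 1).sum)).2) := by
  rfl

lemma ljust_repl (c len : Nat) (h : c ≤ len) :
    pyLjust (List.replicate c 'O') len '.' = List.replicate c 'O' ++ List.replicate (len - c) '.' := by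
  unfold pyLjust
  rw [List.length_replicate]
  split_ifs with h1
  · have : len = c := le_antisymm h1 h
    subst this
    simp
  · rfl

lemma aRow_eq (l : List Char) (w : Int) :
    aRow l w = (PySem.Chars.join ['#'] (aLoop (PySem.Chars.splitOn l ['#']) ((l.length : Nat) : Int) w).1,
                (aLoop (PySem.Chars.splitOn l ['#']) ((l.length : Nat) : Int) w).2) := rfl

-- the hash-free row case
lemma rowEq_hashfree (l : List Char) (h : '#' ∉ l) (w : Int) : aRow l w = bRow l w := by
  rw [aRow_eq]
  unfold bRow
  rw [splitOn_hashfree l h, aLoop_cons, count_singleton]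
  have hseg := bScan_seg l.length l [] 0 [] l.length w h (le_refl _)
  simp only [List.nil_append, List.append_nil, List.length_nil, Nat.zero_add, Nat.cast_zero, sub_zero] at hseg
  rw [hseg]
  simp only [aLoop, bScan]
  rw [PySem.Chars.join_singleton, ljust_repl _ _ List.count_le_length,
      sum_pyRange_desc (l.count 'O') (l.length : Int)]

-- the split row case
lemma rowEq_split (p rest : List Char) (hp : '#' ∉ p)
    (hIH : ∀ w, aRow rest w = bRow rest w) (w : Int) :
    aRow (p ++ '#' :: rest) w = bRow (p ++ '#' :: rest) w := by
  have hc_le : p.count 'O' ≤ p.length := List.count_le_length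
  have hn : (p ++ '#' :: rest).length = p.length + 1 + rest.length := by simp; omega
  have hpos : (((p ++ '#' :: rest).length : Nat) : Int) - (((p.length : Nat) : Int) + 1)
      = ((rest.length : Nat) : Int) := by rw [hn]; push_cast; ring
  -- the weight handed to the tail, in A's form and in B's form (equal by sum_pyRange_desc)
  set w1 : Int := w + (PySem.List.pyRange ((((p ++ '#' :: rest).length : Nat) : Int)
      - ((p.count 'O' : Nat) : Int) + 1) ((((p ++ '#' :: rest).length : Nat) : Int) + 1) 1).sum with hw1
  have hw1' : w1 = w + wsum (((p ++ '#' :: rest).length : Nat) : Int) (p.count 'O') := by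
    rw [hw1, sum_pyRange_desc]
  -- A side
  have hA : aRow (p ++ '#' :: rest) w
      = (pyLjust (List.replicate (p.count 'O') 'O') p.length '.' ++ ['#'] ++ (aRow rest w1).1,
         (aRow rest w1).2) := by
    rw [aRow_eq (p ++ '#' :: rest), splitOn_cons_hash p rest hp, aLoop_cons, count_singleton,
        hpos, aRow_eq rest]
    obtain ⟨s0, L0, hS⟩ := List.exists_cons_of_ne_nil (splitOn_ne_nil rest)
    rw [hS, aLoop_cons, PySem.Chars.join_cons_cons]
  -- B side
  have hD : (List.replicate (p.count 'O') 'O' ++ List.replicate (p.length - p.count 'O') '.'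
      ++ ['#']).length = p.length + 1 := by simp; omega
  have hB : bRow (p ++ '#' :: rest) w
      = ((List.replicate (p.count 'O') 'O' ++ List.replicate (p.length - p.count 'O') '.' ++ ['#'])
            ++ (bRow rest w1).1,
         (bRow rest w1).2) := by
    unfold bRow
    rw [hn]
    have hseg := bScan_seg (p.length + 1 + rest.length) p ('#' :: rest) 0 []
        (p.length + 1 + rest.length) w hp (by omega)
    simp only [List.nil_append, List.length_nil, Nat.zero_add, Nat.cast_zero, sub_zero] at hseg
    rw [hseg]
    simp only [bScan, reduceIte]
    have hset : (List.replicate (p.count 'O') 'O'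
          ++ List.replicate (p.length + 1 + rest.length - p.count 'O') '.').set p.length '#'
        = (List.replicate (p.count 'O') 'O' ++ List.replicate (p.length - p.count 'O') '.' ++ ['#'])
            ++ List.replicate rest.length '.' := by
      have hrep : List.replicate (p.length + 1 + rest.length - p.count 'O') '.'
          = List.replicate (p.length - p.count 'O') '.' ++ '.' :: List.replicate rest.length '.' := by
        rw [show p.length + 1 + rest.length - p.count 'O'
            = (p.length - p.count 'O') + (1 + rest.length) from by omega,
           List.replicate_add]
        simp [List.replicate_succ, List.replicate_add]
      have hgen : ∀ (A B C : List Char) (x y : Char),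
          (A ++ (B ++ x :: C)).set (A.length + B.length) y = (A ++ (B ++ [y])) ++ C := by
        intro A B C x y
        rw [show A.length + B.length = A.length + (B.length + 0) from rfl, set_append_len,
            set_append_len, List.set_cons_zero]
        simp [List.append_assoc]
      rw [hrep]
      generalize hBB : List.replicate (p.length - p.count 'O') '.' = B
      have hidx : p.length = (List.replicate (p.count 'O') 'O').length + B.length := by
        rw [← hBB]; simp; omega
      rw [hidx, hgen]
      simp [List.append_assoc]
    rw [hset]
    have hsh := bScan_shift rest (p.length + 1) rest.length 0 0
        (List.replicate (p.count 'O') 'O' ++ List.replicate (p.length - p.count 'O') '.' ++ ['#'])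
        (List.replicate rest.length '.')
        (w + wsum ((↑(p.length + 1 + rest.length) : Int)) (p.count 'O')) hD
    simp only [Nat.add_zero] at hsh
    rw [hsh, bScan_add rest rest.length 0 0 (List.replicate rest.length '.') w1,
        show w1 = w + wsum ((↑(p.length + 1 + rest.length) : Int)) (p.count 'O') from by rw [hw1', hn]]
  rw [hA, hB, hIH w1, ljust_repl _ _ hc_le]

-- per-row equivalence
lemma rowEq_aux : ∀ (N : Nat) (l : List Char), l.length ≤ N → ∀ (w : Int), aRow l w = bRow l w := by
  intro N
  induction N with
  | zero =>
    intro l hl w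
    have : l = [] := List.eq_nil_of_length_eq_zero (by omega)
    subst this
    exact rowEq_hashfree [] (by simp) w
  | succ N ih =>
    intro l hl w
    by_cases hmem : '#' ∈ l
    · have hdec : l = l.takeWhile (· ≠ '#') ++ l.dropWhile (· ≠ '#') :=
        (List.takeWhile_append_dropWhile).symm
      have hdw : l.dropWhile (· ≠ '#') ≠ [] := by
        intro hnil
        have := List.dropWhile_eq_nil_iff.mp hnil '#' hmem
        simp at this
      obtain ⟨hd, tl, hcons⟩ := List.exists_cons_of_ne_nil hdw
      have hhd : hd = '#' := by
        have h5 := List.head_dropWhile_not (fun x => decide (x ≠ '#')) hdw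
        have h8 : (List.dropWhile (fun x => decide (x ≠ '#')) l).head hdw = hd :=
          Option.some.inj (by rw [← List.head?_eq_some_head hdw, hcons]; rfl)
        rw [h8] at h5
        simpa using h5
      have hp : '#' ∉ l.takeWhile (· ≠ '#') := by
        intro hm
        have := List.mem_takeWhile_imp hm
        simp at this
      have hl' : l = l.takeWhile (· ≠ '#') ++ '#' :: tl := by
        conv_lhs => rw [hdec]
        rw [hcons, hhd]
      have htl : tl.length ≤ N := by
        have := congrArg List.length hl'
        simp at this
        omega
      rw [hl']
      exact rowEq_split _ _ hp (fun w' => ih tl htl w') w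
    · exact rowEq_hashfree l hmem w

lemma rowEq (l : List Char) (w : Int) : aRow l w = bRow l w :=
  rowEq_aux l.length l (le_refl _) w

lemma foldEq (rot : List (List Char)) : ∀ (acc : List (List Char) × Int),
    rot.foldl (fun (acc : List (List Char) × Int) l =>
        let (r, w') := aRow l acc.2
        (acc.1 ++ [r], w')) acc
      = rot.foldl (fun (acc : List (List Char) × Int) l =>
        let (r, w') := bRow l acc.2
        (acc.1 ++ [r], w')) acc := by
  intro acc
  simp only [rowEq]

-- ===== VERDICT (by name: the statement is the Claim_ definition above) =====
theorem make_boulders_roll_spec : Claim_equal_make_boulders_roll := by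
  intro data_lines _
  simp only [Spec_make_boulders_roll, make_boulders_roll, make_boulders_roll_alt, foldEq]
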